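-- pv_equiv track=rewrite | github.com/rae-hugo-kim/Pixel-Maker | pixelmaker/core/grid_detector.py | _cluster_midpoints
-- ===== SOURCE A (Python) =====
-- def _cluster_midpoints(positions: list[int], gap: int = 2) -> list[int]:
--     """Group consecutive positions into clusters, return midpoints."""
--     if not positions:
--         return []
--     clusters: list[list[int]] = []
--     current = [positions[0]]
--     for pos in positions[1:]:
--         if pos - current[-1] <= gap:
--             current.append(pos)
--         else:
--             clusters.append(current)
--             current = [pos]
--     clusters.append(current)
--     return [sum(c) // len(c) for c in clusters]
-- ===== SOURCE B (Python) =====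
-- def _cluster_midpoints(positions: list[int], gap: int = 2) -> list[int]:
--     """Two-pass: index the split points, then carve positions into segments."""
--     if not positions:
--         return []
--     cuts = [i for i, (x, y) in enumerate(zip(positions, positions[1:]), 1) if y - x > gap]
--     bounds = [0] + cuts + [len(positions)]
--     segments = [positions[a:b] for a, b in zip(bounds, bounds[1:])]
--     return [sum(seg) // len(seg) for seg in segments]
-- ===== Notes on version B (the rewrite author's own statement) =====
-- stated objective: alternative
-- what changed: Replaces A's one-pass accumulator that grows a 'current' cluster and appends it to a clusters list with a two-pass scheme: first collect the indices where an adjacent difference exceeds gap, then slice the list between consecutive cut indices and take each segment's floor mean.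
import Mathlib
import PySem

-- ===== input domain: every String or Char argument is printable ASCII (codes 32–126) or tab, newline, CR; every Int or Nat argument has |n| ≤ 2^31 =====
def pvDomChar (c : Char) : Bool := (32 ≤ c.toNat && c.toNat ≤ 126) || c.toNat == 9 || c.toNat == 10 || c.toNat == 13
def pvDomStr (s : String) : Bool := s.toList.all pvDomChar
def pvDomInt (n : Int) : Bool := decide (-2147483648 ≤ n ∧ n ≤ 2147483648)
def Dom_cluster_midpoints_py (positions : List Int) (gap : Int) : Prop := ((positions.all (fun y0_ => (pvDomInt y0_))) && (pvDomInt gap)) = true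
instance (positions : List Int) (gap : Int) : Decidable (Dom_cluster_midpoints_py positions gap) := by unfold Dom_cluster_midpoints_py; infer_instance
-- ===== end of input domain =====

-- B replaces A's incremental one-pass accumulator by a two-pass decomposition (index the
-- split points first, then carve the list into segments); objective: alternative, not faster.

-- ===== PORT A =====
-- literal transliteration of A: accumulate (clusters, current) over positions[1:],
-- current[-1] via pyGetD (current is never empty, so the default 0 is never used)
def cluster_midpoints_py (positions : List Int) (gap : Int) : List Int :=
  match positions with
  | [] => []
  | p0 :: rest =>
    let r := rest.foldl
      (fun (st : List (List Int) × List Int) pos =>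
        if pos - PySem.List.pyGetD st.2 (-1) 0 ≤ gap then (st.1, st.2 ++ [pos])
        else (st.1 ++ [st.2], [pos]))
      ([], [p0])
    (r.1 ++ [r.2]).map (fun c => PySem.Int.floordiv c.sum (c.length : Int))

-- ===== PORT B =====
-- literal transliteration of B: cut indices via enumerate(zip(positions, positions[1:]), 1),
-- bounds = [0] + cuts + [len], segments = slices between consecutive bounds
def cluster_midpoints_py_alt (positions : List Int) (gap : Int) : List Int :=
  if positions.isEmpty then []
  else
    let cuts : List Int :=
      ((positions.zip (positions.drop 1)).zipIdx 1).filterMap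
        (fun p => if p.1.2 - p.1.1 > gap then some ((p.2 : Int)) else none)
    let bounds : List Int := 0 :: (cuts ++ [(positions.length : Int)])
    let segments := (bounds.zip (bounds.drop 1)).map
      (fun p => PySem.List.slice positions (some p.1) (some p.2))
    segments.map (fun seg => PySem.Int.floordiv seg.sum (seg.length : Int))

-- ===== PRECONDITION & SPEC =====
def Spec_cluster_midpoints_py (positions : List Int) (gap : Int) (out : List Int) : Prop := out = cluster_midpoints_py_alt positions gap
instance (positions : List Int) (gap : Int) (out : List Int) : Decidable (Spec_cluster_midpoints_py positions gap out) := by unfold Spec_cluster_midpoints_py; infer_instance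

-- ===== CLAIM (what is proved, stated in full; the proofs are below) =====
def Claim_equal_cluster_midpoints_py : Prop := ∀ (positions : List Int) (gap : Int), Dom_cluster_midpoints_py positions gap → Spec_cluster_midpoints_py positions gap (cluster_midpoints_py positions gap)

-- ===== LEMMAS AND PROOFS =====

-- common reference grouping: split the list where an adjacent difference exceeds gap
def grp (gap : Int) : List Int → List (List Int)
  | [] => []
  | [x] => [[x]]
  | x :: y :: rest =>
    match grp gap (y :: rest) with
    | [] => [[x]]
    | g :: gs => if y - x ≤ gap then (x :: g) :: gs else [x] :: g :: gs

theorem grp_cons_ne_nil (gap x : Int) (xs : List Int) : grp gap (x :: xs) ≠ [] := by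
  cases xs with
  | nil => simp [grp]
  | cons y rest =>
    simp only [grp]
    rcases grp gap (y :: rest) with _ | ⟨g, gs⟩
    · simp
    · split_ifs <;> simp

-- A's loop, as a recursion on the remaining input with the growing current cluster
def chunksA (gap : Int) : List Int → List Int → List (List Int)
  | cur, [] => [cur]
  | cur, p :: rest =>
    if p - PySem.List.pyGetD cur (-1) 0 ≤ gap then chunksA gap (cur ++ [p]) rest
    else cur :: chunksA gap [p] rest

theorem foldA (gap : Int) : ∀ (rest : List Int) (cls : List (List Int)) (cur : List Int),
    (rest.foldl
      (fun (st : List (List Int) × List Int) pos =>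
        if pos - PySem.List.pyGetD st.2 (-1) 0 ≤ gap then (st.1, st.2 ++ [pos])
        else (st.1 ++ [st.2], [pos]))
      (cls, cur)).1
    ++ [(rest.foldl
      (fun (st : List (List Int) × List Int) pos =>
        if pos - PySem.List.pyGetD st.2 (-1) 0 ≤ gap then (st.1, st.2 ++ [pos])
        else (st.1 ++ [st.2], [pos]))
      (cls, cur)).2]
    = cls ++ chunksA gap cur rest := by
  intro rest
  induction rest with
  | nil => intro cls cur; simp [chunksA]
  | cons p rest ih =>
    intro cls cur
    simp only [List.foldl_cons, chunksA]
    by_cases h : p - PySem.List.pyGetD cur (-1) 0 ≤ gap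
    · simp only [h, if_pos]
      exact ih cls (cur ++ [p])
    · simp only [h, if_neg, not_false_iff]
      rw [ih (cls ++ [cur]) [p]]
      simp

theorem chunksA_eq_grp (gap : Int) : ∀ (l cur : List Int), cur ≠ [] →
    chunksA gap cur l =
      (match l, grp gap l with
       | [], _ => [cur]
       | _ :: _, [] => [cur]
       | p :: _, g :: gs =>
         if p - PySem.List.pyGetD cur (-1) 0 ≤ gap then (cur ++ g) :: gs else cur :: g :: gs) := by
  intro l
  induction l with
  | nil => intro cur hc; simp [chunksA]
  | cons p rest ih =>
    intro cur hc
    simp only [chunksA]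
    cases rest with
    | nil =>
      simp only [grp]
      by_cases h : p - PySem.List.pyGetD cur (-1) 0 ≤ gap <;> simp [h, chunksA]
    | cons q rest' =>
      rcases hg : grp gap (q :: rest') with _ | ⟨g, gs⟩
      · exact absurd hg (grp_cons_ne_nil gap q rest')
      · have h1 : chunksA gap (cur ++ [p]) (q :: rest') =
          (if q - p ≤ gap then ((cur ++ [p]) ++ g) :: gs else (cur ++ [p]) :: g :: gs) := by
          rw [ih (cur ++ [p]) (by simp), hg]
          simp [PySem.List.pyGetD_neg_one_append_singleton]
        have h2 : chunksA gap [p] (q :: rest') =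
          (if q - p ≤ gap then ([p] ++ g) :: gs else [p] :: g :: gs) := by
          rw [ih [p] (by simp), hg]
          have : PySem.List.pyGetD [p] (-1) 0 = p := by
            simpa using PySem.List.pyGetD_neg_one_append_singleton (xs := ([] : List Int)) (x := p) (d := 0)
          simp [this]
        simp only [grp, hg]
        by_cases hp : p - PySem.List.pyGetD cur (-1) 0 ≤ gap <;>
          by_cases hq : q - p ≤ gap <;>
            simp [hp, hq, h1, h2]

-- B's machinery
def ncuts (gap : Int) (l : List Int) : List Nat :=
  ((l.zip (l.drop 1)).zipIdx 1).filterMap (fun p => if p.1.2 - p.1.1 > gap then some p.2 else none)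

def walkSegs (positions : List Int) : Nat → List Nat → List (List Int)
  | _, [] => []
  | a, b :: bs =>
    PySem.List.slice positions (some (a : Int)) (some (b : Int)) :: walkSegs positions b bs

theorem ncuts_shift (gap x y : Int) (rest : List Int) :
    ncuts gap (x :: y :: rest) =
      (if y - x > gap then [1] else []) ++ (ncuts gap (y :: rest)).map (· + 1) := by
  simp only [ncuts, List.drop_succ_cons, List.drop_zero, List.zip_cons_cons, List.zipIdx_cons,
    List.filterMap_cons, List.zipIdx_succ, List.filterMap_map, List.map_filterMap]
  by_cases h : y - x > gap <;>
    simp [h, Function.comp, apply_ite (Option.map (· + 1))]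

theorem walkSegs_shift (x : Int) (l : List Int) :
    ∀ (bs : List Nat) (a : Nat),
      walkSegs (x :: l) (a + 1) (bs.map (· + 1)) = walkSegs l a bs := by
  intro bs
  induction bs with
  | nil => intro a; simp [walkSegs]
  | cons b bs ih =>
    intro a
    simp only [List.map_cons, walkSegs, PySem.List.slice_natCast, Nat.succ_sub_succ,
      List.drop_succ_cons, ih]

theorem walkSegs_grp (gap : Int) : ∀ (l : List Int) (x : Int),
    walkSegs (x :: l) 0 (ncuts gap (x :: l) ++ [(x :: l).length]) = grp gap (x :: l) := by
  intro l
  induction l with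
  | nil =>
    intro x
    simp [ncuts, walkSegs, grp, PySem.List.slice_toNat]
  | cons y rest ih =>
    intro x
    rw [ncuts_shift]
    rcases hc : ncuts gap (y :: rest) ++ [(y :: rest).length] with _ | ⟨c, cs⟩
    · simp at hc
    · have hIH := ih y
      rw [hc] at hIH
      by_cases h : y - x > gap
      · -- new cluster starts at index 1
        simp only [h, if_pos, List.cons_append, List.nil_append]
        have hm : ((ncuts gap (y :: rest)).map (· + 1)) ++ [(x :: y :: rest).length] =
            (ncuts gap (y :: rest) ++ [(y :: rest).length]).map (· + 1) := by
          simp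
        rw [hm, hc]
        show walkSegs (x :: y :: rest) 0 (1 :: (c :: cs).map (· + 1)) = _
        have hw : walkSegs (x :: y :: rest) (0 + 1) ((c :: cs).map (· + 1)) =
            walkSegs (y :: rest) 0 (c :: cs) := walkSegs_shift x (y :: rest) (c :: cs) 0
        simp only [walkSegs, hw]
        have hx : PySem.List.slice (x :: y :: rest) (some ((0 : Nat) : Int)) (some ((1 : Nat) : Int)) = [x] := by
          rw [PySem.List.slice_natCast (xs := x :: y :: rest) (a := 0) (b := 1)]; rfl
        rcases hg : grp gap (y :: rest) with _ | ⟨g, gs⟩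
        · exact absurd hg (grp_cons_ne_nil gap y rest)
        · have hnle : ¬ (y - x ≤ gap) := by omega
          simp only [grp, hg, hx, hnle, if_neg, not_false_iff]
          simp only [walkSegs] at hIH
          rw [hg] at hIH
          exact congrArg (List.cons [x]) hIH
      · -- x joins the first cluster of (y :: rest)
        simp only [h, if_neg, not_false_iff, List.nil_append]
        have : ((ncuts gap (y :: rest)).map (· + 1)) ++ [(x :: y :: rest).length] =
            (ncuts gap (y :: rest) ++ [(y :: rest).length]).map (· + 1) := by
          simp
        rw [this, hc]
        show walkSegs (x :: y :: rest) 0 ((c + 1) :: cs.map (· + 1)) = _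
        have hw : walkSegs (x :: y :: rest) (c + 1) (cs.map (· + 1)) =
            walkSegs (y :: rest) c cs := walkSegs_shift x (y :: rest) cs c
        simp only [walkSegs, hw]
        have hfirst : PySem.List.slice (x :: y :: rest) (some ((0 : Nat) : Int)) (some ((c + 1 : Nat) : Int)) =
            x :: PySem.List.slice (y :: rest) (some ((0 : Nat) : Int)) (some ((c : Nat) : Int)) := by
          rw [PySem.List.slice_natCast (xs := x :: y :: rest) (a := 0) (b := c + 1),
              PySem.List.slice_natCast (xs := y :: rest) (a := 0) (b := c)]
          simp
        simp only [walkSegs] at hIH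
        simp only [grp]
        rcases hg : grp gap (y :: rest) with _ | ⟨g, gs⟩
        · exact absurd hg (grp_cons_ne_nil gap y rest)
        · have hle : y - x ≤ gap := by omega
          simp only [hle, if_pos]
          rw [hg] at hIH
          have hseg : PySem.List.slice (y :: rest) (some ((0 : Nat) : Int)) (some ((c : Nat) : Int)) = g ∧
              walkSegs (y :: rest) c cs = gs := by
            constructor
            · exact (List.cons.injEq _ _ _ _).mp hIH |>.1
            · exact (List.cons.injEq _ _ _ _).mp hIH |>.2
          rw [hfirst, hseg.1, hseg.2]

theorem zip_map_walkSegs (positions : List Int) : ∀ (bs : List Nat) (a : Nat),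
    ((((a :: bs).map (fun k : Nat => (k : Int))).zip
        (((a :: bs).map (fun k : Nat => (k : Int))).drop 1)).map
      (fun p => PySem.List.slice positions (some p.1) (some p.2)))
    = walkSegs positions a bs := by
  intro bs
  induction bs with
  | nil => intro a; simp [walkSegs]
  | cons b bs ih =>
    intro a
    simp only [List.map_cons, List.drop_succ_cons, List.drop_zero, List.zip_cons_cons,
      List.map_cons, walkSegs]
    have := ih b
    simp only [List.map_cons, List.drop_succ_cons, List.drop_zero] at this
    rw [this]

theorem cuts_cast (gap : Int) (positions : List Int) :
    ((positions.zip (positions.drop 1)).zipIdx 1).filterMap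
        (fun p => if p.1.2 - p.1.1 > gap then some ((p.2 : Int)) else none)
      = (ncuts gap positions).map (fun k : Nat => (k : Int)) := by
  simp [ncuts, List.map_filterMap, apply_ite (Option.map (fun k : Nat => (k : Int)))]

theorem alt_eq_grp (gap : Int) (p0 : Int) (rest : List Int) :
    cluster_midpoints_py_alt (p0 :: rest) gap =
      (grp gap (p0 :: rest)).map (fun c => PySem.Int.floordiv c.sum (c.length : Int)) := by
  simp only [cluster_midpoints_py_alt, List.isEmpty_cons, if_neg, Bool.false_eq_true,
    not_false_iff, cuts_cast]
  have hb : (0 : Int) :: ((ncuts gap (p0 :: rest)).map (fun k : Nat => (k : Int)) ++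
        [((p0 :: rest).length : Int)]) =
      ((0 :: (ncuts gap (p0 :: rest) ++ [(p0 :: rest).length])).map (fun k : Nat => (k : Int))) := by
    simp
  rw [hb, zip_map_walkSegs, walkSegs_grp]

theorem a_eq_grp (gap : Int) (p0 : Int) (rest : List Int) :
    cluster_midpoints_py (p0 :: rest) gap =
      (grp gap (p0 :: rest)).map (fun c => PySem.Int.floordiv c.sum (c.length : Int)) := by
  simp only [cluster_midpoints_py]
  rw [foldA gap rest [] [p0]]
  congr 1
  rw [chunksA_eq_grp gap rest [p0] (by simp)]
  cases rest with
  | nil => simp [grp]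
  | cons q rest' =>
    rcases hg : grp gap (q :: rest') with _ | ⟨g, gs⟩
    · exact absurd hg (grp_cons_ne_nil gap q rest')
    · have hp : PySem.List.pyGetD [p0] (-1) 0 = p0 := by
        simpa using PySem.List.pyGetD_neg_one_append_singleton (xs := ([] : List Int)) (x := p0) (d := 0)
      simp only [grp, hg, hp]
      by_cases h : q - p0 ≤ gap <;> simp [h]

-- ===== VERDICT (by name: the statement is the Claim_ definition above) =====
theorem cluster_midpoints_py_spec : Claim_equal_cluster_midpoints_py := by
  intro positions gap _
  unfold Spec_cluster_midpoints_py
  cases positions with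
  | nil => rfl
  | cons p0 rest => rw [a_eq_grp, alt_eq_grp]
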